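-- pv_equiv track=rewrite | github.com/polyphony-dev/polyphony | tests/if/if26.py | f
-- ===== SOURCE A (Python) =====
-- def f(v, i):
--     if i == 0:
--         return v
--     elif i == 1:
--         return v + 1
--     else:
--         for k in range(i):
--             v += 1
--         return v
-- ===== SOURCE B (Python) =====
-- def f(v, i):
--     # closed form: the loop adds 1 exactly max(i, 0) times
--     return v + max(i, 0)
-- ===== Notes on version B (the rewrite author's own statement) =====
-- stated objective: faster
-- what changed: replaced the branch-plus-increment-loop with the closed form v + max(i, 0)
import Mathlib
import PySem

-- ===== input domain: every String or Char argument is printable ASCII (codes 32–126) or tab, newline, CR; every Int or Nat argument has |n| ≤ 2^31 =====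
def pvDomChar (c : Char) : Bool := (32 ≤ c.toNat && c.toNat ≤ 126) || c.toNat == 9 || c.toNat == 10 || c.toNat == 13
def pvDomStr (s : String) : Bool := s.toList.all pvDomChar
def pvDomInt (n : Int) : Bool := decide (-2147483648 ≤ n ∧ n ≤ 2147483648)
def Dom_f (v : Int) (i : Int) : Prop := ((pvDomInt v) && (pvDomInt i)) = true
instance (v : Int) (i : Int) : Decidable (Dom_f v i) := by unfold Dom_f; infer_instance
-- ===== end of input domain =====

-- B replaces A's increment loop with the closed form v + max(i, 0): O(1) instead of O(i).

-- ===== PORT A =====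
def f (v : Int) (i : Int) : Int :=
  if i = 0 then v
  else if i = 1 then v + 1
  else (PySem.List.pyRange 0 i 1).foldl (fun v _ => v + 1) v

-- ===== PORT B =====
def f_alt (v : Int) (i : Int) : Int := v + max i 0

-- ===== PRECONDITION & SPEC =====
def Spec_f (v : Int) (i : Int) (out : Int) : Prop := out = f_alt v i
instance (v : Int) (i : Int) (out : Int) : Decidable (Spec_f v i out) := by unfold Spec_f; infer_instance

-- ===== CLAIM (what is proved, stated in full; the proofs are below) =====
def Claim_equal_f : Prop := ∀ (v : Int) (i : Int), Dom_f v i → Spec_f v i (f v i)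

-- ===== LEMMAS AND PROOFS =====
theorem foldl_add_one (l : List Int) (v : Int) :
    l.foldl (fun v _ => v + 1) v = v + l.length := by
  induction l generalizing v with
  | nil => simp
  | cons a t ih => simp [List.foldl, ih]; omega

-- ===== VERDICT (by name: the statement is the Claim_ definition above) =====
theorem f_spec : Claim_equal_f := by
  intro v i _
  unfold Spec_f f f_alt
  split_ifs with h0 h1
  · omega
  · omega
  · rw [foldl_add_one, PySem.List.length_pyRange_one]
    omega
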